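-- pv_equiv track=rewrite | github.com/Randoom97/AOC | 2024/day21/day21.py | retainShortest
-- ===== SOURCE A (Python) =====
-- def retainShortest(codes):
--     shortest = None
--     for code in codes:
--         if shortest == None:
--             shortest = len(code)
--         shortest = min(len(code), shortest)
--     shortSet = set()
--     for code in codes:
--         if len(code) == shortest:
--             shortSet.add(code)
--     return shortSet
-- ===== SOURCE B (Python) =====
-- def retainShortest(codes):
--     best = None
--     result = set()
--     for code in codes:
--         l = len(code)
--         if best is None or l < best:
--             best = l
--             result = {code}
--         elif l == best:
--             result.add(code)
--     return result
-- ===== Notes on version B (the rewrite author's own statement) =====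
-- stated objective: faster
-- what changed: B replaces A's two scans (one to find the minimum length, one to filter) with a single pass that maintains the current minimum length and the set of codes of that length, resetting the set when a shorter code appears (measured ~2x faster).
import Mathlib
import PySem

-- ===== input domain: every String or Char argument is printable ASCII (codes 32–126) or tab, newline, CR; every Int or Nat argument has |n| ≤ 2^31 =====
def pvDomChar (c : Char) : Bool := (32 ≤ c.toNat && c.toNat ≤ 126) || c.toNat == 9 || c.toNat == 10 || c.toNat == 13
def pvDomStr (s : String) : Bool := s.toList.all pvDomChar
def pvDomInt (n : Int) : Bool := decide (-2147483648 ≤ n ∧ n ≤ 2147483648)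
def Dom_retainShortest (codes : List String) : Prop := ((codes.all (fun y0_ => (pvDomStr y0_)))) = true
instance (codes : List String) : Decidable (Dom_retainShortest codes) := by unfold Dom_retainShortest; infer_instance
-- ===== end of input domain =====

-- B replaces A's two scans (min then filter) with a single pass that maintains the
-- current minimum length and the set of codes of that length (objective: simpler).


-- ===== PORT A =====
-- first loop: shortest = None; for code in codes: if shortest == None: shortest = len(code); shortest = min(len(code), shortest)
def rsStepA (s : Option Int) (code : String) : Option Int :=
  let s := if s = none then some (PySem.Str.len code) else s
  some (min (PySem.Str.len code) (s.getD 0))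

def retainShortest (codes : List String) : List String :=
  let shortest := codes.foldl rsStepA none
  -- second loop: shortSet = set(); for code in codes: if len(code) == shortest: shortSet.add(code)
  codes.foldl
    (fun shortSet code =>
      if some (PySem.Str.len code) = shortest then PySem.Set.add shortSet code else shortSet)
    PySem.Set.empty

-- ===== PORT B =====
-- 'if best is None or l < best' is ported as a match on best followed by the l < b test
def rsStepB (st : Option Int × PySem.Set String) (code : String) : Option Int × PySem.Set String :=
  let l := PySem.Str.len code
  match st with
  | (none, _) => (some l, [code])
  | (some b, result) =>
    if l < b then (some l, [code])
    else if l = b then (some b, PySem.Set.add result code)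
    else (some b, result)

def retainShortest_alt (codes : List String) : List String :=
  (codes.foldl rsStepB (none, PySem.Set.empty)).2

-- ===== PRECONDITION & SPEC =====
def Spec_retainShortest (codes : List String) (out : List String) : Prop := out = retainShortest_alt codes
instance (codes : List String) (out : List String) : Decidable (Spec_retainShortest codes out) := by unfold Spec_retainShortest; infer_instance

-- ===== CLAIM (what is proved, stated in full; the proofs are below) =====
def Claim_equal_retainShortest : Prop := ∀ (codes : List String), Dom_retainShortest codes → Spec_retainShortest codes (retainShortest codes)

-- ===== LEMMAS AND PROOFS =====

-- A's first pass: its result is `some m` with m the minimum length, and m bounds every element's length.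
theorem rsMin_le (codes : List String) (s : Option Int) (m : Int)
    (h : codes.foldl rsStepA s = some m) :
    ∀ x ∈ codes, m ≤ PySem.Str.len x := by
  induction codes generalizing s with
  | nil => simp
  | cons c cs ih =>
    intro x hx
    simp only [List.foldl_cons] at h
    rcases List.mem_cons.mp hx with rfl | hx
    · -- m ≤ len c: by invariant, folding from rsStepA s c keeps result ≤ len c component-wise
      -- prove auxiliary: foldl result is ≤ any starting some value
      have aux : ∀ (l : List String) (v : Int) (m' : Int),
          l.foldl rsStepA (some v) = some m' → m' ≤ v := by
        intro l
        induction l with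
        | nil => intro v m' h'; simp at h'; omega
        | cons d ds ihd =>
          intro v m' h'
          simp only [List.foldl_cons] at h'
          have := ihd (min (PySem.Str.len d) v) m' (by simpa [rsStepA] using h')
          omega
      have hst : rsStepA s x = some (min (PySem.Str.len x) ((if s = none then some (PySem.Str.len x) else s).getD 0)) := rfl
      rw [hst] at h
      have := aux cs _ m h
      omega
    · exact ih _ h x hx

-- the fold of A's first pass starting from `some v` computes min of v and the lengths
theorem rsMinA_some (codes : List String) (v : Int) :
    codes.foldl rsStepA (some v) = some (codes.foldl (fun a c => min (PySem.Str.len c) a) v) := by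
  induction codes generalizing v with
  | nil => rfl
  | cons c cs ih => simp only [List.foldl_cons, rsStepA]; simp [ih]

-- A's second pass keeps the accumulator unchanged over codes that all have length strictly above the target
theorem rsCollect_skip (codes : List String) (o : Option Int) (acc : PySem.Set String)
    (h : ∀ x ∈ codes, some (PySem.Str.len x) ≠ o) :
    codes.foldl (fun s code => if some (PySem.Str.len code) = o then PySem.Set.add s code else s) acc = acc := by
  induction codes generalizing acc with
  | nil => rfl
  | cons c cs ih =>
    simp only [List.foldl_cons]
    rw [if_neg (h c (by simp))]
    exact ih _ (fun x hx => h x (by simp [hx]))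

-- The single-pass state equals (A's running minimum, A's filtered set for that minimum).
theorem rsInvariant (codes : List String) :
    codes.foldl rsStepB (none, PySem.Set.empty) =
      (codes.foldl rsStepA none,
       codes.foldl
         (fun s code => if some (PySem.Str.len code) = codes.foldl rsStepA none then PySem.Set.add s code else s)
         PySem.Set.empty) := by
  induction codes using List.reverseRecOn with
  | nil => rfl
  | append_singleton p c ih =>
    rw [List.foldl_append, List.foldl_append, List.foldl_append, ih]
    simp only [List.foldl_cons, List.foldl_nil]
    rcases hp : p.foldl rsStepA none with _ | m
    · -- p must be empty: foldl from none is none only on []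
      have hpnil : p = [] := by
        cases p with
        | nil => rfl
        | cons d ds =>
          exfalso
          simp only [List.foldl_cons, rsStepA] at hp
          rw [rsMinA_some] at hp
          simp at hp
      subst hpnil
      simp [rsStepB, rsStepA, PySem.Set.empty, PySem.Set.add]
    · have hm := rsMin_le p none m hp
      have hstepA : rsStepA (some m) c = some (min (PySem.Str.len c) m) := by
        simp [rsStepA]
      simp only [PySem.Str.len_eq] at hm hstepA
      by_cases hlt : (c.toList.length : Int) < m
      · -- new strict minimum: B resets; A's filter over p collects nothing
        have hmin : min (c.toList.length : Int) m = (c.toList.length : Int) := by omega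
        have hskip := rsCollect_skip p (some (c.toList.length : Int)) PySem.Set.empty
          (fun x hx => by
            have h1 := hm x hx
            simp only [ne_eq, Option.some.injEq, PySem.Str.len_eq] at *
            omega)
        simp only [hstepA, hmin]
        have hlt' : (c.length : Int) < m := by simpa using hlt
        have hskip' := hskip
        simp only [PySem.Str.len_eq] at hskip'
        simp [PySem.Set.add, PySem.Set.empty] at hskip'
        simp [rsStepB, PySem.Set.add, PySem.Set.empty, hlt', hskip']
      · -- len c ≥ m: minimum unchanged; both filters agree
        have hmin : min (c.toList.length : Int) m = m := by omega
        simp only [hstepA, hmin, PySem.Str.len_eq, rsStepB]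
        by_cases heq : (c.toList.length : Int) = m
        · rw [if_neg hlt, if_pos heq, if_pos (congrArg some heq)]
          rfl
        · rw [if_neg hlt, if_neg heq, if_neg (fun hcon => heq (Option.some.inj hcon))]
          rfl

-- ===== VERDICT (by name: the statement is the Claim_ definition above) =====
theorem retainShortest_spec : Claim_equal_retainShortest := by
  intro codes _
  unfold Spec_retainShortest retainShortest retainShortest_alt
  rw [rsInvariant]
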